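/- GENERATED by tools/from_farm_form.py from prooffarm-gif/accepted/DGifGetScreenDesc.E/Lemmas.lean (a worked proof of the farm's unit `DGifGetScreenDesc.E`,
   accepted by the verdict) — do not edit. -/
import Gif.Spec.AllSegs

open X86 X86.User Asan ProgX.Base ProgX.Base.Spec Gif.Spec

/-!
  Lemmas of the unit `DGifGetScreenDesc.E`.
  `dgsd_epilogue_same2` is `Gif.Spec.epilogue_same` (Gif/Spec/FrameCarry.lean §4) for TWO heaps: the entry's invariant speaks of the
  entry's heap `H0`, the invariant before the epilogue of the final heap `H1` (`DGifGetScreenDesc` allocates the colour map). Only the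
  stack half of the shadow layer (`StackOK`) is used, and that does not mention the heap.
-/

namespace Gif.Spec.DGifGetScreenDesc_E

/-- **The frame's shadow span leaves the footprint** (the restoration of `Returned.same`), for a function whose heap changed between
the entry (`H0`, memory `m0`) and the epilogue (`H1`, memory `m1` before the epilogue's stores): the frame's shadow bytes were 0 at
the entry (`StackOK.clean`) and are 0 again after the epilogue's stores (`FrameLayout.epilogue_clean`). `w` = the stack window,
`ws` = the contract's windows. -/
theorem dgsd_epilogue_same2 {H0 H1 : Heap} {rest : List Obj} {frames : List (Nat × FrameLayout)} {top top' ro ro' : Nat}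
    {m0 m1 : Mem} {Fl : FrameLayout} {w : Span} {ws : List Span} (hro : Fl.raOff = ro) (hro' : Fl.raOff - Fl.size = ro')
    (hinv0 : HeapInv H0 rest frames (top + 8) m0) (hinv1 : HeapInv H1 rest ((top - ro, Fl) :: frames) top' m1)
    (hra : top % 8 = 0)
    (hsame : Mem.SameExcept (w :: shadowSpan (top - ro) (top - ro') :: ws) m0 m1) :
    Mem.SameExcept (w :: ws) m0 (storesMem m1 ((top - ro) / 8) Fl.epilogue) := by
  subst hro
  subst hro'
  have hact := hinv1.shadow.stack.active (top - Fl.raOff, Fl) List.mem_cons_self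
  simp only at hact
  obtain ⟨hF, hb8, hb1, hb2, hp⟩ := hact
  have hlo := hinv1.shadow.stack.lo
  have hc1 := FrameLayout.epilogue_clean hF hb8 hb2 hp
  have hc0 := hinv0.shadow.stack.clean
  obtain ⟨hs8, _, hein, _, _, _, _, _, hr8, hrs⟩ := hF
  have hg : (top - Fl.raOff) / 8 + Fl.size / 8 ≤ 0x200000 := by omega
  have h2 := storesMem_sameExcept m1 ((top - Fl.raOff) / 8) (Fl.size / 8) Fl.epilogue hein hg
  intro a ha
  by_cases hin : 0xC00000 + (top - Fl.raOff) / 8 ≤ a.toNat ∧ a.toNat < 0xC00000 + (top - Fl.raOff) / 8 + Fl.size / 8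
  · -- a shadow byte of the frame: 0 in both memories
    have ea : a = shadowAddr (a.toNat - 0xC00000) := eq_shadowAddr a _ (by omega)
    have z1 := hc1 (a.toNat - 0xC00000) (by omega) (by omega)
    have z0 := hc0 (a.toNat - 0xC00000) (by omega) (by omega)
    unfold shadowOf at z1 z0
    rw [← ea] at z1 z0
    apply UInt8.toNat_inj.mp
    rw [z1, z0]
  · -- any other byte: neither the epilogue's stores nor the function wrote it
    have e2 : (storesMem m1 ((top - Fl.raOff) / 8) Fl.epilogue).read a = m1.read a := by
      apply h2 a
      intro x hx
      have e := List.mem_singleton.mp hx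
      rw [e]
      simp only
      omega
    rw [e2]
    apply hsame a
    intro x hx
    rcases List.mem_cons.mp hx with e | hx'
    · rw [e]
      exact ha w List.mem_cons_self
    · rcases List.mem_cons.mp hx' with e | hx''
      · rw [e]
        unfold shadowSpan
        simp only
        omega
      · exact ha x (List.mem_cons_of_mem _ hx'')

end Gif.Spec.DGifGetScreenDesc_E
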